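-- pv_equiv track=rewrite | github.com/millymij/Algorand-Token-Manager | src/server.py | parse_sms_data
-- ===== SOURCE A (Python) =====
-- def parse_sms_data(text_message):
--     lines = text_message.split('\n')
--     amount = "Unspecified"
--     address = "Unspecified"
--     token = "Unspecified"
--     for line in lines:
--         if 'Amount: ' in line:
--             amount = line.split('Amount: ')[1].split(' microAlgos')[0]
--         if 'From Address: ' in line:
--             address = line.split('From Address: ')[1]
--         if 'Your Token: ' in line:
--             token = line.split('Your Token: ')[1]
--
--     return amount, address, token
-- ===== SOURCE B (Python) =====
-- def parse_sms_data(text_message):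
--     lines = text_message.split('\n')
--
--     def last_field(key):
--         # last-line-wins: scan from the end and stop at the first hit
--         for line in reversed(lines):
--             if key in line:
--                 return line.split(key)[1]
--         return "Unspecified"
--
--     amount = last_field('Amount: ').split(' microAlgos')[0]
--     return amount, last_field('From Address: '), last_field('Your Token: ')
-- ===== Notes on version B (the rewrite author's own statement) =====
-- stated objective: alternative
-- what changed: Replaces the single forward loop with three accumulator variables by three independent reversed early-exit searches (last matching line per field), with the unit-suffix trim on the amount applied once as a post-step.
import Mathlib
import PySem

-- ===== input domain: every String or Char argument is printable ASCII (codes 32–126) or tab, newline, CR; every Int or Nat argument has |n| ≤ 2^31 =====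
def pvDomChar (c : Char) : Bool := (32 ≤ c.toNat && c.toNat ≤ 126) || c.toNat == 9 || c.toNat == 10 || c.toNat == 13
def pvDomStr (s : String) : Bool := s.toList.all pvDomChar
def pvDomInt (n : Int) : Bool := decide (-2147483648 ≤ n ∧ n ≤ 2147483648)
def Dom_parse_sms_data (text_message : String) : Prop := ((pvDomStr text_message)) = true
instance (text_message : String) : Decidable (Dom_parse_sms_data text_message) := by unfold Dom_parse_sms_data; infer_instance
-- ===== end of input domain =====

-- B replaces A's forward loop over three accumulators by three independent
-- reversed early-exit searches (last matching line per field); same results.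


-- ===== PORT A =====
-- line.split(key)[1]; the [1] is guarded by 'key in line' in the source, so the
-- "" default of getD is never used there (exact on every reachable input).
def pvSplitAt (line key : String) : String :=
  ((PySem.Str.split? line key).getD []).getD 1 ""

def parse_sms_data (text_message : String) : String × String × String :=
  let lines := (PySem.Str.split? text_message "\n").getD []
  lines.foldl
    (fun st line =>
      ( if PySem.Str.isIn "Amount: " line then
          (((PySem.Str.split? (pvSplitAt line "Amount: ") " microAlgos").getD []).getD 0 "")
        else st.1,
        if PySem.Str.isIn "From Address: " line then pvSplitAt line "From Address: " else st.2.1,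
        if PySem.Str.isIn "Your Token: " line then pvSplitAt line "Your Token: " else st.2.2 ))
    ("Unspecified", "Unspecified", "Unspecified")

-- ===== PORT B =====
-- last_field: scan the lines from the end, return the extraction at the first hit
def pvLastField (lines : List String) (key : String) : String :=
  match lines.reverse.find? (fun l => PySem.Str.isIn key l) with
  | some l => ((PySem.Str.split? l key).getD []).getD 1 ""
  | none => "Unspecified"

def parse_sms_data_alt (text_message : String) : String × String × String :=
  let lines := (PySem.Str.split? text_message "\n").getD []
  let amount :=
    ((PySem.Str.split? (pvLastField lines "Amount: ") " microAlgos").getD []).getD 0 ""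
  (amount, pvLastField lines "From Address: ", pvLastField lines "Your Token: ")

-- ===== PRECONDITION & SPEC =====
def Spec_parse_sms_data (text_message : String) (out : String × String × String) : Prop := out = parse_sms_data_alt text_message
instance (text_message : String) (out : String × String × String) : Decidable (Spec_parse_sms_data text_message out) := by unfold Spec_parse_sms_data; infer_instance

-- ===== CLAIM (what is proved, stated in full; the proofs are below) =====
def Claim_equal_parse_sms_data : Prop := ∀ (text_message : String), Dom_parse_sms_data text_message → Spec_parse_sms_data text_message (parse_sms_data text_message)

-- ===== LEMMAS AND PROOFS =====
-- a last-wins overwrite loop computes the same as a reversed first-match search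
theorem foldl_if_eq_find_rev {α β : Type} (p : α → Bool) (f : α → β) (init : β)
    (xs : List α) :
    xs.foldl (fun acc x => if p x then f x else acc) init
      = (match xs.reverse.find? p with | some x => f x | none => init) := by
  induction xs generalizing init with
  | nil => rfl
  | cons a xs ih =>
    simp only [List.foldl_cons, ih, List.reverse_cons, List.find?_append]
    cases h : xs.reverse.find? p with
    | some x => simp [Option.or]
    | none =>
      cases hp : p a <;> simp [List.find?, hp, Option.or]

-- a fold whose three components are updated independently splits into three folds
theorem foldl_triple {α : Type} (f1 f2 f3 : String → α → String)
    (i1 i2 i3 : String) (xs : List α) :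
    xs.foldl (fun (st : String × String × String) l =>
        (f1 st.1 l, f2 st.2.1 l, f3 st.2.2 l)) (i1, i2, i3)
      = (xs.foldl f1 i1, xs.foldl f2 i2, xs.foldl f3 i3) := by
  induction xs generalizing i1 i2 i3 with
  | nil => rfl
  | cons a xs ih => simp only [List.foldl_cons, ih]

-- eta-normalised unfolding of pvLastField (the form foldl_if_eq_find_rev produces)
theorem pvLastField_eq (lines : List String) (key : String) :
    pvLastField lines key
      = (match lines.reverse.find? (PySem.Str.isIn key) with
         | some l => ((PySem.Str.split? l key).getD []).getD 1 ""
         | none => "Unspecified") := by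
  unfold pvLastField
  congr 1

-- ===== VERDICT (by name: the statement is the Claim_ definition above) =====
-- the two ports agree on any list of lines
theorem parse_core (lines : List String) :
    lines.foldl
      (fun st line =>
        ( if PySem.Str.isIn "Amount: " line then
            (((PySem.Str.split? (pvSplitAt line "Amount: ") " microAlgos").getD []).getD 0 "")
          else st.1,
          if PySem.Str.isIn "From Address: " line then pvSplitAt line "From Address: " else st.2.1,
          if PySem.Str.isIn "Your Token: " line then pvSplitAt line "Your Token: " else st.2.2 ))
      ("Unspecified", "Unspecified", "Unspecified")
    = (((PySem.Str.split? (pvLastField lines "Amount: ") " microAlgos").getD []).getD 0 "",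
       pvLastField lines "From Address: ", pvLastField lines "Your Token: ") := by
  refine Eq.trans (foldl_triple
    (fun a l => if PySem.Str.isIn "Amount: " l then
        (((PySem.Str.split? (pvSplitAt l "Amount: ") " microAlgos").getD []).getD 0 "") else a)
    (fun a l => if PySem.Str.isIn "From Address: " l then pvSplitAt l "From Address: " else a)
    (fun a l => if PySem.Str.isIn "Your Token: " l then pvSplitAt l "Your Token: " else a)
    "Unspecified" "Unspecified" "Unspecified" lines) ?_
  refine congrArg₂ Prod.mk ?_ (congrArg₂ Prod.mk ?_ ?_)
  · rw [foldl_if_eq_find_rev, pvLastField_eq lines "Amount: "]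
    cases lines.reverse.find? (PySem.Str.isIn "Amount: ") <;> rfl
  · rw [foldl_if_eq_find_rev, pvLastField_eq lines "From Address: "]
    cases lines.reverse.find? (PySem.Str.isIn "From Address: ") <;> rfl
  · rw [foldl_if_eq_find_rev, pvLastField_eq lines "Your Token: "]
    cases lines.reverse.find? (PySem.Str.isIn "Your Token: ") <;> rfl

theorem parse_sms_data_spec : Claim_equal_parse_sms_data := by
  intro tm _
  show parse_sms_data tm = parse_sms_data_alt tm
  exact parse_core ((PySem.Str.split? tm "\n").getD [])
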